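-- pv_equiv track=rewrite | github.com/RicardoSalgadoB/Hamming-Codes | utils.py | decode
-- ===== SOURCE A (Python) =====
-- from typing import List
--
-- def decode(encoded_msg) -> List[int]:
--     """Decodes a message. It removes its parity bits
--
--     Args:
--         encoded_msg (List[int]): The encoded message
--
--     Returns:
--         List[int]: The decoded message, no more parity bits
--     """
--     msg = encoded_msg.copy()    # Crear copia
--     msg.pop(0)
--     i = 0
--     while 2**i-i < len(msg):
--         msg.pop(2**i-i-1)
--         i += 1
--     return msg
-- ===== SOURCE B (Python) =====
-- from typing import List
--
-- def decode(encoded_msg) -> List[int]: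
--     """Decodes a message by dropping the parity-bit positions.
--
--     Instead of destructively popping one parity bit per power of two
--     (shifting the tail each time), compute the set of parity indices in
--     one pass and keep the rest with a single filtering pass.
--     """
--     msg = encoded_msg.copy()
--     msg.pop(0)
--     n = len(msg)
--     parity = set()
--     p = 1
--     while p < n:
--         parity.add(p - 1)
--         p *= 2
--     return [x for j, x in enumerate(msg) if j not in parity]
-- ===== Notes on version B (the rewrite author's own statement) =====
-- stated objective: alternative
-- what changed: Replaces A's destructive pop-one-parity-bit-per-power loop (which shifts the remaining tail on every pop) with a non-destructive two-phase pass: first compute the set of parity indices {2^i-1 : 2^i < n}, then keep the other elements in a single filtering pass over enumerate.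
import Mathlib
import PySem

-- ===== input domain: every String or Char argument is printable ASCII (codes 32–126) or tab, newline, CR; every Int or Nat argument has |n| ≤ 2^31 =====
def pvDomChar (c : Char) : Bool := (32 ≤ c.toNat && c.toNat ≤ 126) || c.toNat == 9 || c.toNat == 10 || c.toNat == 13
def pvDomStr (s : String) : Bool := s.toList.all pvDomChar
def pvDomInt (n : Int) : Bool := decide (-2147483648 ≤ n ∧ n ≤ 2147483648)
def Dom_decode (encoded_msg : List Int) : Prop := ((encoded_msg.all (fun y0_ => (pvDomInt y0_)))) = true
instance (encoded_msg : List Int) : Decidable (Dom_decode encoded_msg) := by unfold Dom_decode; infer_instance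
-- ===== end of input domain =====

-- B removes the parity positions with a parity-index set plus one filtering pass
-- instead of A's destructive pop-per-power-of-two loop (objective: alternative).

-- ===== PORT A =====
-- while 2**i-i < len(msg): msg.pop(2**i-i-1); i += 1
-- msg.pop(k) with 0 ≤ k < len(msg) is exactly List.eraseIdx (the guard guarantees
-- 2^i - i - 1 < msg.length, and 2^i ≥ i + 1 so the Nat subtractions match Python's ints).
def decodeLoopA (i : Nat) (msg : List Int) : List Int :=
  if 2 ^ i - i < msg.length then
    decodeLoopA (i + 1) (msg.eraseIdx (2 ^ i - i - 1))
  else msg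
termination_by msg.length
decreasing_by
  have hi : i < 2 ^ i := Nat.lt_two_pow_self
  rw [List.length_eraseIdx]
  split <;> omega


def decode (encoded_msg : List Int) : List Int :=
  match encoded_msg with
  | [] => []          -- msg.pop(0) raises IndexError here; excluded by Pre_decode
  | _ :: msg => decodeLoopA 0 msg

-- ===== PORT B =====
-- while p < n: parity.add(p - 1); p *= 2   (p stays a positive integer, kept as Nat;
-- the element added is the Python int p - 1, hence the Int cast)
def parityLoopB (n : Nat) (p : Nat) (hp : 0 < p) (parity : PySem.Set Int) : PySem.Set Int :=
  if p < n then parityLoopB n (p * 2) (by omega) (PySem.Set.add parity ((p : Int) - 1))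
  else parity
termination_by n - p
decreasing_by omega

-- [x for j, x in enumerate(msg) if j not in parity]
def decode_alt (encoded_msg : List Int) : List Int :=
  match encoded_msg with
  | [] => []          -- msg.pop(0) raises IndexError here; excluded by Pre_decode
  | _ :: msg =>
    let n := msg.length
    let parity := parityLoopB n 1 (by omega) PySem.Set.empty
    ((PySem.List.enumerate msg).filter
      (fun jx => !(PySem.Set.contains parity jx.1))).map (fun jx => jx.2)

-- ===== PRECONDITION & SPEC =====
-- A's msg.pop(0) raises IndexError on the empty list (and so does B's); only that input is excluded.
def Pre_decode (encoded_msg : List Int) : Prop := encoded_msg ≠ []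
instance (encoded_msg : List Int) : Decidable (Pre_decode encoded_msg) := by unfold Pre_decode; infer_instance

def pvWitness_decode : List Int := [1, 0, 1, 1, 0, 1, 0]

def Spec_decode (encoded_msg : List Int) (out : List Int) : Prop := out = decode_alt encoded_msg
instance (encoded_msg : List Int) (out : List Int) : Decidable (Spec_decode encoded_msg out) := by unfold Spec_decode; infer_instance

-- ===== CLAIM (what is proved, stated in full; the proofs are below) =====
def Claim_equal_decode : Prop := ∀ (encoded_msg : List Int), Dom_decode encoded_msg → Pre_decode encoded_msg → Spec_decode encoded_msg (decode encoded_msg)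

-- ===== LEMMAS AND PROOFS =====

-- Common normal form: from step i on, the surviving elements of msg are the runs
-- between consecutive parity indices 2^k - 1.
def tailF (m : List Int) (i : Nat) : List Int :=
  if 2 ^ i < m.length then
    ((m.drop (2 ^ i)).take (2 ^ i - 1)) ++ tailF m (i + 1)
  else m.drop (2 ^ i - 1)
termination_by m.length - 2 ^ i
decreasing_by
  have : 2 ^ i < 2 ^ (i + 1) := by
    have := Nat.one_le_two_pow (n := i); rw [pow_succ]; omega
  omega

theorem loopA_eq_tailF (m : List Int) :
    ∀ d i (pre : List Int), m.length ≤ 2 ^ i + d →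
      pre.length = 2 ^ i - 1 - i → 2 ^ i - 1 ≤ m.length →
      decodeLoopA i (pre ++ m.drop (2 ^ i - 1)) = pre ++ tailF m i := by
  intro d
  induction d with
  | zero =>
    intro i pre hd hpre hlen
    have hi : i < 2 ^ i := Nat.lt_two_pow_self
    rw [decodeLoopA, tailF]
    have hlenL : (pre ++ m.drop (2 ^ i - 1)).length = m.length - i := by
      simp [hpre]; omega
    rw [if_neg (by omega), if_neg (by omega)]
  | succ d ih =>
    intro i pre hd hpre hlen
    have hi : i < 2 ^ i := Nat.lt_two_pow_self
    have hi1 : 2 ^ (i + 1) = 2 ^ i + 2 ^ i := by rw [pow_succ]; omega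
    by_cases h : 2 ^ i < m.length
    · have hlenL : (pre ++ m.drop (2 ^ i - 1)).length = m.length - i := by
        simp [hpre]; omega
      rw [decodeLoopA, if_pos (by omega)]
      have herase : (pre ++ m.drop (2 ^ i - 1)).eraseIdx (2 ^ i - i - 1)
          = pre ++ m.drop (2 ^ i) := by
        rw [List.eraseIdx_append_of_length_le (by omega)]
        congr 1
        rw [hpre]
        have h0 : 2 ^ i - i - 1 - (2 ^ i - 1 - i) = 0 := by omega
        rw [h0, List.eraseIdx_zero, List.tail_drop]
        congr 1; omega
      rw [herase]
      rw [tailF, if_pos h]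
      by_cases h2 : 2 ^ (i + 1) - 1 ≤ m.length
      · -- full run; recurse
        have hsplit : pre ++ m.drop (2 ^ i)
            = (pre ++ (m.drop (2 ^ i)).take (2 ^ i - 1)) ++ m.drop (2 ^ (i + 1) - 1) := by
          rw [List.append_assoc]
          congr 1
          have h1 := List.take_append_drop (2 ^ i - 1) (m.drop (2 ^ i))
          have h2 : (m.drop (2 ^ i)).drop (2 ^ i - 1) = m.drop (2 ^ (i + 1) - 1) := by
            rw [List.drop_drop]; congr 1; omega
          rw [← h2]; exact h1.symm
        rw [hsplit]
        rw [ih (i + 1) (pre ++ (m.drop (2 ^ i)).take (2 ^ i - 1)) (by omega)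
          (by simp [hpre]; omega) (by omega)]
        simp [List.append_assoc]
      · -- short tail: loop stops at i+1
        rw [decodeLoopA]
        have hlenL2 : (pre ++ m.drop (2 ^ i)).length = m.length - i - 1 := by
          simp [hpre]; omega
        rw [if_neg (by omega)]
        rw [tailF, if_neg (by omega)]
        have hdropnil : m.drop (2 ^ (i + 1) - 1) = ([] : List Int) :=
          List.drop_eq_nil_of_le (by omega)
        rw [hdropnil, List.append_nil]
        congr 1
        exact (List.take_of_length_le (by simp; omega)).symm
    · rw [decodeLoopA, tailF]
      have hlenL : (pre ++ m.drop (2 ^ i - 1)).length = m.length - i := by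
        simp [hpre]; omega
      rw [if_neg (by omega), if_neg (by omega)]

theorem mem_parityLoopB (n : Nat) :
    ∀ p (hp : 0 < p) (s : PySem.Set Int) (j : Int),
      j ∈ parityLoopB n p hp s ↔ j ∈ s ∨ ∃ k : Nat, p * 2 ^ k < n ∧ j = ((p * 2 ^ k : Nat) : Int) - 1 := by
  intro p hp s j
  fun_induction parityLoopB n p hp s with
  | case1 p hp s h ih =>
    rw [ih, PySem.Set.mem_add]
    constructor
    · rintro ((hs | he) | ⟨k, hk, hj⟩)
      · exact .inl hs
      · exact .inr ⟨0, by simpa using h, by simpa using he⟩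
      · refine .inr ⟨k + 1, ?_, ?_⟩
        · rw [pow_succ]; ring_nf; ring_nf at hk; omega
        · rw [hj]; congr 1; push_cast; ring
    · rintro (hs | ⟨k, hk, hj⟩)
      · exact .inl (.inl hs)
      · match k with
        | 0 => exact .inl (.inr (by simpa using hj))
        | k + 1 =>
          refine .inr ⟨k, ?_, ?_⟩
          · rw [pow_succ] at hk; ring_nf; ring_nf at hk; omega
          · rw [hj]; congr 1; push_cast; ring
  | case2 p hp s h =>
    simp only [not_lt] at h
    constructor
    · exact fun hs => .inl hs
    · rintro (hs | ⟨k, hk, _⟩)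
      · exact hs
      · exfalso
        have h2 : 0 < 2 ^ k := Nat.two_pow_pos k
        have h3 : p ≤ p * 2 ^ k := Nat.le_mul_of_pos_right p h2
        omega

-- characterization of the parity set built by B
theorem contains_parity (n : Nat) (j : Int) :
    PySem.Set.contains (parityLoopB n 1 (by omega) PySem.Set.empty) j = true
      ↔ ∃ k : Nat, 2 ^ k < n ∧ j = ((2 ^ k : Nat) : Int) - 1 := by
  rw [PySem.Set.contains_iff, mem_parityLoopB]
  simp [PySem.Set.empty]

-- all elements of an enumerate block survive the filter when no index is a parity index
theorem filter_keep_enum (n : Nat) (t : List Int) (s : Int)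
    (h : ∀ k : Nat, k < t.length → ∀ q : Nat, 2 ^ q < n → s + k ≠ ((2 ^ q : Nat) : Int) - 1) :
    (PySem.List.enumerate t s).filter
      (fun jx => !(PySem.Set.contains (parityLoopB n 1 (by omega) PySem.Set.empty) jx.1)) =
      PySem.List.enumerate t s := by
  rw [List.filter_eq_self]
  intro a ha
  rw [PySem.List.mem_enumerate_iff] at ha
  obtain ⟨k, hk, rfl⟩ := ha
  simp only [Bool.not_eq_eq_eq_not, Bool.not_true]
  rw [Bool.eq_false_iff]
  intro hc
  rw [contains_parity] at hc
  obtain ⟨q, hq, hj⟩ := hc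
  exact h k hk q hq hj

-- the stop case: from index 2^i - 1 on, nothing is filtered out
theorem filterB_stop (m : List Int) (i : Nat) (hstop : m.length ≤ 2 ^ i)
    (hlen : 2 ^ i - 1 ≤ m.length) :
    ((PySem.List.enumerate (m.drop (2 ^ i - 1)) (((2 ^ i - 1 : Nat) : Int))).filter
      (fun jx => !(PySem.Set.contains (parityLoopB m.length 1 (by omega) PySem.Set.empty) jx.1))).map (fun jx => jx.2)
    = m.drop (2 ^ i - 1) := by
  rw [filter_keep_enum, PySem.List.map_snd_enumerate]
  intro k hk q hq heq
  have hq2 : (1:Nat) ≤ 2 ^ q := Nat.one_le_two_pow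
  have hi2 : (1:Nat) ≤ 2 ^ i := Nat.one_le_two_pow
  omega

theorem filterB_eq_tailF (m : List Int) :
    ∀ d i, m.length ≤ 2 ^ i + d → 2 ^ i - 1 ≤ m.length →
      ((PySem.List.enumerate (m.drop (2 ^ i - 1)) (((2 ^ i - 1 : Nat) : Int))).filter
        (fun jx => !(PySem.Set.contains (parityLoopB m.length 1 (by omega) PySem.Set.empty) jx.1))).map (fun jx => jx.2)
      = tailF m i := by
  intro d
  induction d with
  | zero =>
    intro i hd hlen
    rw [tailF, if_neg (by omega)]
    exact filterB_stop m i (by omega) hlen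
  | succ d ih =>
    intro i hd hlen
    have hi : i < 2 ^ i := Nat.lt_two_pow_self
    have hi1 : 2 ^ (i + 1) = 2 ^ i + 2 ^ i := by rw [pow_succ]; omega
    by_cases h : 2 ^ i < m.length
    · rw [tailF, if_pos h]
      have hidx : 2 ^ i - 1 < m.length := by omega
      rw [List.drop_eq_getElem_cons hidx, PySem.List.enumerate_cons]
      -- the head is a parity index: it is filtered out
      have hhead : (PySem.Set.contains (parityLoopB m.length 1 (by omega) PySem.Set.empty)
          ((2 ^ i - 1 : Nat) : Int)) = true := by
        rw [contains_parity]
        refine ⟨i, h, ?_⟩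
        have hi2 : (1:Nat) ≤ 2 ^ i := Nat.one_le_two_pow
        omega
      rw [List.filter_cons_of_neg (by simp only [hhead, Bool.not_true]; exact Bool.false_ne_true)]
      -- split the rest into the kept run and the remaining suffix
      have h1 := List.take_append_drop (2 ^ i - 1) (m.drop (2 ^ i))
      have h2 : (m.drop (2 ^ i)).drop (2 ^ i - 1) = m.drop (2 ^ (i + 1) - 1) := by
        rw [List.drop_drop]; congr 1; omega
      have hsplit : m.drop (2 ^ i - 1 + 1) = (m.drop (2 ^ i)).take (2 ^ i - 1) ++ m.drop (2 ^ (i + 1) - 1) := by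
        rw [← h2]
        rw [show 2 ^ i - 1 + 1 = 2 ^ i by omega]
        exact h1.symm
      rw [hsplit, PySem.List.enumerate_append, List.filter_append, List.map_append]
      have hi2 : (1:Nat) ≤ 2 ^ i := Nat.one_le_two_pow
      congr 1
      · -- kept run: indices in [2^i, 2^(i+1)-2] are never parity indices
        rw [filter_keep_enum, PySem.List.map_snd_enumerate]
        intro k hk q hq heq
        have hklen : k < 2 ^ i - 1 := by
          have := List.length_take_le (2 ^ i - 1) (m.drop (2 ^ i))
          omega
        have hq2 : (1:Nat) ≤ 2 ^ q := Nat.one_le_two_pow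
        have hnat : 2 ^ q = 2 ^ i + k + 1 := by
          have h3 : 2 ^ q = 2 ^ i - 1 + k + 2 := by
            have h4 : ((2 ^ q : Nat) : Int) = ((2 ^ i - 1 + k + 2 : Nat) : Int) := by
              push_cast [Nat.cast_sub hi2] at heq ⊢; linarith
            exact_mod_cast h4
          omega
        have hlow : 2 ^ i < 2 ^ q := by omega
        have hiq : i < q := (Nat.pow_lt_pow_iff_right (by omega)).mp hlow
        have hhigh : 2 ^ (i + 1) ≤ 2 ^ q := Nat.pow_le_pow_right (by omega) (by omega)
        clear heq hq
        generalize hA : 2 ^ i = A at *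
        generalize hB : 2 ^ q = B at *
        generalize hC : 2 ^ (i + 1) = C at *
        omega
      · by_cases h2' : 2 ^ (i + 1) - 1 ≤ m.length
        · have htlen : ((m.drop (2 ^ i)).take (2 ^ i - 1)).length = 2 ^ i - 1 := by
            rw [List.length_take]; simp; omega
          rw [htlen]
          have hstart : ((2 ^ i - 1 : Nat) : Int) + 1 + ((2 ^ i - 1 : Nat) : Int)
              = ((2 ^ (i + 1) - 1 : Nat) : Int) := by
            omega
          rw [hstart]
          exact ih (i + 1) (by omega) (by omega)
        · have hnil : m.drop (2 ^ (i + 1) - 1) = ([] : List Int) :=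
            List.drop_eq_nil_of_le (by omega)
          rw [hnil, tailF, if_neg (by omega), hnil]
          simp [PySem.List.enumerate]
    · rw [tailF, if_neg (by omega)]
      exact filterB_stop m i (by omega) hlen

-- ===== VERDICT (by name: the statement is the Claim_ definition above) =====
theorem decode_spec : Claim_equal_decode := by
  intro e _ hpre
  unfold Spec_decode
  match e with
  | [] => exact absurd rfl hpre
  | a :: m =>
    show decodeLoopA 0 m = _
    have hA := loopA_eq_tailF m m.length 0 [] (by simp) (by simp) (by simp)
    simp at hA
    have hB := filterB_eq_tailF m m.length 0 (by simp) (by simp)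
    simp only [pow_zero] at hA hB ⊢
    rw [hA]
    simp only [decode_alt]
    rw [← hB]
    norm_num
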